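-- pv_equiv track=rewrite | github.com/cuiluyi/crawler | utils.py | process_text_in_parts
-- ===== SOURCE A (Python) =====
-- def process_text_in_parts(
--     text: str,
--     n_parts: int = 6,
-- ):
--     """
--     Split the text into n_parts roughly equal parts, and create cumulative prefixes.
--     Args:
--         text (str): The full text to be processed.
--         n_parts (int): Number of parts to split the text into.
--     Returns:
--         list[str]: List of cumulative text prefixes.
--     """
--     part_length = len(text) // n_parts
--     # Split the text into 6 roughly equal parts
--     parts = [
--         text[i * part_length : (i + 1) * part_length]
--         for i in range(n_parts - 1)
--     ]
--     parts.append(text[(n_parts - 1) * part_length :])  # the last part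
--
--     # Create cumulative prefixes
--     cumulative_texts = []
--     for i in range(1, n_parts + 1):
--         cumulative_texts.append("".join(parts[:i]))
--
--     return cumulative_texts
-- ===== SOURCE B (Python) =====
-- def process_text_in_parts(
--     text: str,
--     n_parts: int = 6,
-- ):
--     part_length = len(text) // n_parts
--     return [
--         text if i == n_parts else text[: i * part_length]
--         for i in range(1, n_parts + 1)
--     ]
-- ===== Notes on version B (the rewrite author's own statement) =====
-- stated objective: simpler
-- what changed: B drops the intermediate parts list and the join-of-prefixes loop entirely: each cumulative prefix is one direct arithmetic slice text[:i*part_length] in a single comprehension, with the full text as the last element.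
import Mathlib
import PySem

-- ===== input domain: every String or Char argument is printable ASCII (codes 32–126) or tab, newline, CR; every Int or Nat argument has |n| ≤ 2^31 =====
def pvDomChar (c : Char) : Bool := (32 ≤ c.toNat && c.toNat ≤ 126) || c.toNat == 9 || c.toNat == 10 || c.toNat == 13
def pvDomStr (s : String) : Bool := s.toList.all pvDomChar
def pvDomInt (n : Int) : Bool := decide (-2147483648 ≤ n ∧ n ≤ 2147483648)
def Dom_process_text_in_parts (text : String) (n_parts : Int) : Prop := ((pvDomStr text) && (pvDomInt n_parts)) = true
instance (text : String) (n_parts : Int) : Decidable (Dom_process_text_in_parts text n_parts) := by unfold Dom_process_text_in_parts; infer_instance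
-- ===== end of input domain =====

-- B replaces A's parts list and join-of-prefixes loop by one direct arithmetic slice per
-- cumulative prefix (simpler); return values agree on every input where A returns.

-- ===== PORT A =====
def process_text_in_parts (text : String) (n_parts : Int) : List String :=
  let cs := text.toList
  let part_length := PySem.Int.floordiv (cs.length : Int) n_parts
  let parts : List (List Char) :=
    ((PySem.List.pyRange 0 (n_parts - 1) 1).map
      (fun i => PySem.List.slice cs (some (i * part_length)) (some ((i + 1) * part_length))))
    ++ [PySem.List.slice cs (some ((n_parts - 1) * part_length)) none]
  (PySem.List.pyRange 1 (n_parts + 1) 1).foldl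
    (fun acc i =>
      acc ++ [String.ofList (PySem.Chars.join [] (PySem.List.slice parts none (some i)))]) []

-- ===== PORT B =====
def process_text_in_parts_alt (text : String) (n_parts : Int) : List String :=
  let part_length := PySem.Int.floordiv (text.toList.length : Int) n_parts
  (PySem.List.pyRange 1 (n_parts + 1) 1).map
    (fun i => if i = n_parts then text
              else String.ofList (PySem.List.slice text.toList none (some (i * part_length))))

-- ===== PRECONDITION & SPEC =====
-- Pre_ excludes only n_parts = 0, where Python A raises ZeroDivisionError (and B raises too).
def Pre_process_text_in_parts (text : String) (n_parts : Int) : Prop := n_parts ≠ 0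
instance (text : String) (n_parts : Int) : Decidable (Pre_process_text_in_parts text n_parts) := by unfold Pre_process_text_in_parts; infer_instance
def pvWitness_process_text_in_parts : String × Int := ("abcdefgh", 3)

def Spec_process_text_in_parts (text : String) (n_parts : Int) (out : List String) : Prop := out = process_text_in_parts_alt text n_parts
instance (text : String) (n_parts : Int) (out : List String) : Decidable (Spec_process_text_in_parts text n_parts out) := by unfold Spec_process_text_in_parts; infer_instance

-- ===== CLAIM (what is proved, stated in full; the proofs are below) =====
def Claim_equal_process_text_in_parts : Prop := ∀ (text : String) (n_parts : Int), Dom_process_text_in_parts text n_parts → Pre_process_text_in_parts text n_parts → Spec_process_text_in_parts text n_parts (process_text_in_parts text n_parts)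

-- ===== LEMMAS AND PROOFS =====

-- "".join on a list of strings is flatten
theorem pv_join_nil_eq_flatten (l : List (List Char)) : PySem.Chars.join [] l = l.flatten := by
  induction l with
  | nil => simp [PySem.Chars.join_nil]
  | cons p rest ih =>
    cases rest with
    | nil => simp [PySem.Chars.join_singleton]
    | cons q r =>
      rw [PySem.Chars.join_cons_cons]
      simp only [List.flatten_cons] at *
      simp [ih]

-- flattening the first m equal-width chunks of cs is a prefix of cs
theorem pv_flatten_chunks (cs : List Char) (p m : Nat) :
    ((List.range m).map (fun k => (cs.drop (k * p)).take p)).flatten = cs.take (m * p) := by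
  induction m with
  | zero => simp
  | succ m ih =>
    rw [List.range_succ, List.map_append, List.flatten_append, ih]
    have h : (m + 1) * p = m * p + p := by ring
    rw [h, List.take_add]
    simp

theorem process_text_in_parts_eq (text : String) (n_parts : Int)
    (hpre : n_parts ≠ 0) :
    process_text_in_parts text n_parts = process_text_in_parts_alt text n_parts := by
  unfold process_text_in_parts process_text_in_parts_alt
  rcases lt_or_gt_of_ne hpre with hneg | hpos
  · -- n_parts < 0 : the range 1..n_parts is empty on both sides
    have h : n_parts.toNat = 0 := by omega
    simp [PySem.List.pyRange_one, h]
  · -- n_parts ≥ 1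
    obtain ⟨n, hn⟩ : ∃ n : Nat, n_parts = (n : Int) := ⟨n_parts.toNat, by omega⟩
    have hn1 : 1 ≤ n := by omega
    set cs := text.toList with hcs
    have hplnn : 0 ≤ PySem.Int.floordiv (cs.length : Int) n_parts := by
      rw [PySem.Int.floordiv_eq_ediv_of_pos hpos]
      exact Int.ediv_nonneg (by positivity) (by omega)
    obtain ⟨p, hp⟩ : ∃ p : Nat, PySem.Int.floordiv (cs.length : Int) n_parts = (p : Int) :=
      ⟨(PySem.Int.floordiv (cs.length : Int) n_parts).toNat, by omega⟩
    rw [PySem.List.foldl_append_singleton_eq_map, List.nil_append]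
    -- the parts list of A, in chunk form
    have hfront : (PySem.List.pyRange 0 (n_parts - 1) 1).map
        (fun i => PySem.List.slice cs (some (i * PySem.Int.floordiv (cs.length : Int) n_parts))
          (some ((i + 1) * PySem.Int.floordiv (cs.length : Int) n_parts)))
        = (List.range (n - 1)).map (fun k => (cs.drop (k * p)).take p) := by
      rw [PySem.List.pyRange_one, List.map_map]
      have hlen : (n_parts - 1 - 0).toNat = n - 1 := by omega
      rw [hlen]
      apply List.map_congr_left
      intro k _
      simp only [Function.comp, zero_add, hp]
      have h1 : (k : Int) * (p : Int) = ((k * p : Nat) : Int) := by push_cast; ring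
      have h2 : ((k : Int) + 1) * (p : Int) = (((k * p + p) : Nat) : Int) := by push_cast; ring
      rw [h1, h2, PySem.List.slice_natCast]
      congr 1
      omega
    have hlast : PySem.List.slice cs (some ((n_parts - 1) * PySem.Int.floordiv (cs.length : Int) n_parts)) none
        = cs.drop ((n - 1) * p) := by
      rw [hp]
      have h1 : (n_parts - 1) * (p : Int) = (((n - 1) * p : Nat) : Int) := by
        rw [hn]; push_cast; rw [Nat.cast_sub hn1]; ring
      rw [h1, PySem.List.slice_from_natCast]
    rw [hfront, hlast]
    apply List.map_congr_left
    intro i hi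
    rw [PySem.List.mem_pyRange_one] at hi
    obtain ⟨m, hm⟩ : ∃ m : Nat, i = (m : Int) := ⟨i.toNat, by omega⟩
    have hm1 : 1 ≤ m := by omega
    have hmn : m ≤ n := by omega
    have hslice : PySem.List.slice
        ((List.range (n - 1)).map (fun k => (cs.drop (k * p)).take p) ++ [cs.drop ((n - 1) * p)])
        none (some i)
        = ((List.range (n - 1)).map (fun k => (cs.drop (k * p)).take p) ++ [cs.drop ((n - 1) * p)]).take m := by
      rw [hm, PySem.List.slice_to_natCast]
    rw [hslice, pv_join_nil_eq_flatten]
    by_cases hie : i = n_parts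
    · -- last element: the join of all parts is the whole text
      have hmeq : m = n := by omega
      rw [if_pos hie, hmeq]
      have htake : ((List.range (n - 1)).map (fun k => (cs.drop (k * p)).take p) ++ [cs.drop ((n - 1) * p)]).take n
          = (List.range (n - 1)).map (fun k => (cs.drop (k * p)).take p) ++ [cs.drop ((n - 1) * p)] := by
        apply List.take_of_length_le
        simp
        omega
      rw [htake, List.flatten_append, pv_flatten_chunks]
      simp [List.take_append_drop, hcs]
    · -- earlier element: the join of the first m parts is the prefix of length m*p
      have hmlt : m ≤ n - 1 := by omega
      rw [if_neg hie]
      have htake : ((List.range (n - 1)).map (fun k => (cs.drop (k * p)).take p) ++ [cs.drop ((n - 1) * p)]).take m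
          = ((List.range (n - 1)).map (fun k => (cs.drop (k * p)).take p)).take m := by
        apply List.take_append_of_le_length
        simp [hmlt]
      rw [htake, ← List.map_take, List.take_range, Nat.min_eq_left hmlt, pv_flatten_chunks]
      have h1 : i * (p : Int) = ((m * p : Nat) : Int) := by rw [hm]; push_cast; ring
      rw [hp, h1, PySem.List.slice_to_natCast]

-- ===== VERDICT (by name: the statement is the Claim_ definition above) =====
theorem process_text_in_parts_spec : Claim_equal_process_text_in_parts := by
  intro text n_parts _ hpre
  unfold Spec_process_text_in_parts
  exact process_text_in_parts_eq text n_parts hpre
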